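-- pv_equiv track=rewrite | github.com/Alexaaan/Mastermind | backend/game/mastermind.py | check
-- ===== SOURCE A (Python) =====
-- def check(secret_code: str, guess: str):
--     """
--     Compare le guess au secret_code et retourne un tuple (black_pins, white_pins).
--     Les deux chaînes sont de même longueur (4 chiffres).
--     """
--     black = sum(s == g for s, g in zip(secret_code, guess))
--     white = 0
--     # Comptage des chiffres restants à comparer pour les pions blancs
--     secret_count = {}
--     guess_count = {}
--     for s, g in zip(secret_code, guess):
--         if s != g:
--             secret_count[s] = secret_count.get(s, 0) + 1
--             guess_count[g] = guess_count.get(g, 0) + 1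
--     for num in guess_count:
--         if num in secret_count:
--             white += min(secret_count[num], guess_count[num])
--     return black, white
-- ===== SOURCE B (Python) =====
-- def check(secret_code: str, guess: str):
--     """Full-frequency counting: black = positional matches; white = total
--     per-colour minimum overlap minus black (standard Mastermind identity)."""
--     n = min(len(secret_code), len(guess))
--     s, g = secret_code[:n], guess[:n]
--     black = sum(a == b for a, b in zip(s, g))
--     total = sum(min(s.count(d), g.count(d)) for d in set(s))
--     return black, total - black
-- ===== Notes on version B (the rewrite author's own statement) =====
-- stated objective: simpler
-- what changed: Replaces the mismatch-only dict-building loop and guarded key scan with full per-character frequency counts over the zipped prefix, recovering white as (sum of per-colour minimum overlaps) minus black via the standard Mastermind identity.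
import Mathlib
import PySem

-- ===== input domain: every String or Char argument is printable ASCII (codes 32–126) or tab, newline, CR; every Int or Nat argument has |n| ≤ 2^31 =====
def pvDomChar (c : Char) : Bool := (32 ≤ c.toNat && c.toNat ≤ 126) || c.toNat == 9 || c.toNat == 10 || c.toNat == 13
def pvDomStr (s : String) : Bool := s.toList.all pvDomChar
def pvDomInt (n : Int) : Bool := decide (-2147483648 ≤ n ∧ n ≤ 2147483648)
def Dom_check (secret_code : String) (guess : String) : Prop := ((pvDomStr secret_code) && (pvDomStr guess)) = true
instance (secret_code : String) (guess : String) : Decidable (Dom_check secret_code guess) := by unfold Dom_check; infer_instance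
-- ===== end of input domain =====

-- B replaces A's mismatch-only dict-building loop and guarded key scan by full
-- per-character frequency counts and white = (Σ_c min of counts) - black; objective: simpler.

-- ===== PORT A =====
def check (secret_code : String) (guess : String) : Int × Int :=
  let pairs := secret_code.toList.zip guess.toList
  let black : Int := pairs.foldl (fun acc p => acc + (if p.1 == p.2 then 1 else 0)) 0
  let counts := pairs.foldl
    (fun (d : PySem.Dict Char Int × PySem.Dict Char Int) p =>
      if p.1 != p.2 then
        (d.1.insert p.1 (d.1.getD p.1 0 + 1), d.2.insert p.2 (d.2.getD p.2 0 + 1))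
      else d)
    (PySem.Dict.empty, PySem.Dict.empty)
  let white : Int := counts.2.keys.foldl
    (fun w num =>
      if counts.1.contains num then w + min (counts.1.getD num 0) (counts.2.getD num 0) else w) 0
  (black, white)

-- ===== PORT B =====
def check_alt (secret_code : String) (guess : String) : Int × Int :=
  let n := min secret_code.toList.length guess.toList.length
  let s := secret_code.toList.take n
  let g := guess.toList.take n
  let black : Int := (s.zip g).foldl (fun acc p => acc + (if p.1 == p.2 then 1 else 0)) 0
  let total : Int := (PySem.Set.ofList s).foldl
    (fun acc d => acc + min ((s.count d : Int)) ((g.count d : Int))) 0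
  (black, total - black)

-- ===== PRECONDITION & SPEC =====
def Spec_check (secret_code : String) (guess : String) (out : Int × Int) : Prop := out = check_alt secret_code guess
instance (secret_code : String) (guess : String) (out : Int × Int) : Decidable (Spec_check secret_code guess out) := by unfold Spec_check; infer_instance

-- ===== CLAIM (what is proved, stated in full; the proofs are below) =====
def Claim_equal_check : Prop := ∀ (secret_code : String) (guess : String), Dom_check secret_code guess → Spec_check secret_code guess (check secret_code guess)

-- ===== LEMMAS AND PROOFS =====

-- zipping two lists equals zipping their min-length prefixes
theorem pv_zip_take_min {α β : Type} (xs : List α) (ys : List β) :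
    (xs.take (min xs.length ys.length)).zip (ys.take (min xs.length ys.length)) = xs.zip ys := by
  induction xs generalizing ys with
  | nil => simp
  | cons a t ih =>
    cases ys with
    | nil => simp
    | cons b u => simp [Nat.succ_min_succ, ih]

-- a count through a projection splits along matched and mismatched pairs
theorem pv_count_split {β : Type} [DecidableEq β] (L : List (Char × Char)) (f : Char × Char → β) (c : β) :
    ((L.filter (fun p => p.1 == p.2)).map f).count c
      + ((L.filter (fun p => !(p.1 == p.2))).map f).count c
      = (L.map f).count c := by
  induction L with
  | nil => simp
  | cons a t ih =>
    by_cases h : (a.1 == a.2) = true <;>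
      simp [h, List.count_cons] <;> omega

-- 'if p then w + v else w' accumulation is a sum of guarded terms
theorem pv_foldl_if_add {α : Type} (l : List α) (p : α → Bool) (v : α → Int) (a : Int) :
    l.foldl (fun w c => if p c then w + v c else w) a
      = a + (l.map (fun c => if p c then v c else 0)).sum := by
  induction l generalizing a with
  | nil => simp
  | cons x t ih =>
    by_cases h : p x = true <;> simp [h, ih, add_assoc]

-- a sum over the ordered distinct elements is a Finset sum
theorem pv_sum_ofList_eq_finset (xs : List Char) (f : Char → Int) :
    ((PySem.Set.ofList xs).map f).sum = ∑ c ∈ xs.toFinset, f c := by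
  have h1 : (PySem.Set.ofList xs).toFinset = xs.toFinset := by
    ext c; simp [← PySem.List.dedup_eq_ofList, PySem.List.mem_dedup]
  have h2 : (PySem.Set.ofList xs).Nodup := by
    rw [← PySem.List.dedup_eq_ofList]; exact PySem.List.nodup_dedup xs
  rw [← h1, List.sum_toFinset f h2]

-- enlarge the index set of a Finset sum whose terms vanish outside it
theorem pv_sum_extend (xs : List Char) (U : Finset Char) (hU : xs.toFinset ⊆ U)
    (f : Char → Int) (h0 : ∀ c, c ∉ xs.toFinset → f c = 0) :
    ∑ c ∈ xs.toFinset, f c = ∑ c ∈ U, f c :=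
  Finset.sum_subset hU (fun x _ hx => h0 x hx)

-- main list-level equivalence: A's white loop value = B's total minus black
theorem pv_main (s g : List Char) (hlen : s.length = g.length)
    (C : PySem.Dict Char Int × PySem.Dict Char Int)
    (hC : C = (s.zip g).foldl
      (fun (d : PySem.Dict Char Int × PySem.Dict Char Int) p =>
        if p.1 != p.2 then
          (d.1.insert p.1 (d.1.getD p.1 0 + 1), d.2.insert p.2 (d.2.getD p.2 0 + 1))
        else d)
      (PySem.Dict.empty, PySem.Dict.empty)) :
    C.2.keys.foldl
      (fun w num =>
        if C.1.contains num then w + min (C.1.getD num 0) (C.2.getD num 0) else w) 0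
    = ((PySem.Set.ofList s).foldl (fun acc d => acc + min ((s.count d : Int)) ((g.count d : Int))) 0)
      - ((s.zip g).foldl (fun acc p => acc + (if p.1 == p.2 then 1 else 0)) 0) := by
  -- the dict pair A builds is (Counter of mismatched secrets, Counter of mismatched guesses)
  have hCc : C = (PySem.Dict.counter (((s.zip g).filter (fun p => !(p.1 == p.2))).map Prod.fst),
                  PySem.Dict.counter (((s.zip g).filter (fun p => !(p.1 == p.2))).map Prod.snd)) := by
    rw [hC]
    have hfun : (fun (d : PySem.Dict Char Int × PySem.Dict Char Int) (p : Char × Char) =>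
        if p.1 != p.2 then
          (d.1.insert p.1 (d.1.getD p.1 0 + 1), d.2.insert p.2 (d.2.getD p.2 0 + 1))
        else d)
      = (fun d p => if (fun (p : Char × Char) => !(p.1 == p.2)) p then
          ((fun (d : PySem.Dict Char Int) (p : Char × Char) => d.insert p.1 (d.getD p.1 0 + 1)) d.1 p,
           (fun (d : PySem.Dict Char Int) (p : Char × Char) => d.insert p.2 (d.getD p.2 0 + 1)) d.2 p)
        else d) := by
      funext d p; simp [bne]
    rw [hfun, PySem.List.foldl_if_eq_foldl_filter,
      PySem.List.foldl_prod_mk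
        (f := fun (d : PySem.Dict Char Int) (p : Char × Char) => d.insert p.1 (d.getD p.1 0 + 1))
        (g := fun (d : PySem.Dict Char Int) (p : Char × Char) => d.insert p.2 (d.getD p.2 0 + 1))]
    refine Prod.ext ?_ ?_ <;> dsimp only <;>
      rw [← PySem.Dict.foldl_insert_getD_add_one_eq_counter, List.foldl_map]
  -- projections of the zipped list
  have hsL : (s.zip g).map Prod.fst = s := List.map_fst_zip hlen.le
  have hgL : (s.zip g).map Prod.snd = g := List.map_snd_zip hlen.ge
  -- matched pairs have equal components
  have hEeq : ((s.zip g).filter (fun p => p.1 == p.2)).map Prod.snd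
      = ((s.zip g).filter (fun p => p.1 == p.2)).map Prod.fst := by
    apply List.map_congr_left
    intro p hp
    exact (eq_of_beq (List.mem_filter.mp hp).2).symm
  -- per-character count splits
  have hscount : ∀ c : Char, s.count c
      = (((s.zip g).filter (fun p => !(p.1 == p.2))).map Prod.fst).count c
        + (((s.zip g).filter (fun p => p.1 == p.2)).map Prod.fst).count c := by
    intro c
    have h := pv_count_split (s.zip g) Prod.fst c
    rw [hsL] at h
    omega
  have hgcount : ∀ c : Char, g.count c
      = (((s.zip g).filter (fun p => !(p.1 == p.2))).map Prod.snd).count c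
        + (((s.zip g).filter (fun p => p.1 == p.2)).map Prod.fst).count c := by
    intro c
    have h := pv_count_split (s.zip g) Prod.snd c
    rw [hgL, hEeq] at h
    omega
  rw [hCc]
  simp only [PySem.Dict.keys_counter, PySem.Dict.contains_counter, PySem.Dict.getD_counter]
  rw [pv_foldl_if_add]
  -- the containment guard is redundant: a missing key has count 0 and min 0
  have hguard : (PySem.Set.ofList (((s.zip g).filter (fun p => !(p.1 == p.2))).map Prod.snd)).map
        (fun c => if (((s.zip g).filter (fun p => !(p.1 == p.2))).map Prod.fst).contains c then
            min (((((s.zip g).filter (fun p => !(p.1 == p.2))).map Prod.fst).count c : Int))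
                (((((s.zip g).filter (fun p => !(p.1 == p.2))).map Prod.snd).count c : Int))
          else 0)
      = (PySem.Set.ofList (((s.zip g).filter (fun p => !(p.1 == p.2))).map Prod.snd)).map
        (fun c => min (((((s.zip g).filter (fun p => !(p.1 == p.2))).map Prod.fst).count c : Int))
                      (((((s.zip g).filter (fun p => !(p.1 == p.2))).map Prod.snd).count c : Int))) := by
    apply List.map_congr_left
    intro c _
    by_cases h : (((s.zip g).filter (fun p => !(p.1 == p.2))).map Prod.fst).contains c = true
    · rw [if_pos h]
    · rw [if_neg h]
      have hnm : c ∉ ((s.zip g).filter (fun p => !(p.1 == p.2))).map Prod.fst := by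
        simpa using h
      rw [List.count_eq_zero.mpr hnm]
      exact (min_eq_left (by positivity)).symm
  rw [hguard, pv_sum_ofList_eq_finset, PySem.List.foldl_add, pv_sum_ofList_eq_finset,
    PySem.List.foldl_add, PySem.List.sum_map_ite_one_zero]
  -- abbreviate: sm/gm mismatched projections, em matched secrets
  have hblack : ((s.zip g).countP (fun p => p.1 == p.2) : Int)
      = (((((s.zip g).filter (fun p => p.1 == p.2)).map Prod.fst).length : Nat) : Int) := by
    simp [List.countP_eq_length_filter]
  -- the common index set
  have hWext : ∑ c ∈ (((s.zip g).filter (fun p => !(p.1 == p.2))).map Prod.snd).toFinset,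
        min (((((s.zip g).filter (fun p => !(p.1 == p.2))).map Prod.fst).count c : Int))
            (((((s.zip g).filter (fun p => !(p.1 == p.2))).map Prod.snd).count c : Int))
      = ∑ c ∈ s.toFinset ∪ g.toFinset,
        min (((((s.zip g).filter (fun p => !(p.1 == p.2))).map Prod.fst).count c : Int))
            (((((s.zip g).filter (fun p => !(p.1 == p.2))).map Prod.snd).count c : Int)) := by
    apply pv_sum_extend
    · intro c hc
      simp only [List.mem_toFinset] at hc
      rcases List.mem_map.mp hc with ⟨p, hp, rfl⟩
      exact Finset.mem_union_right _
        (List.mem_toFinset.mpr (List.of_mem_zip (List.mem_filter.mp hp).1).2)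
    · intro c hc
      simp only [List.mem_toFinset] at hc
      rw [List.count_eq_zero.mpr hc]
      exact min_eq_right (by positivity)
  have hText : ∑ c ∈ s.toFinset, min ((s.count c : Int)) ((g.count c : Int))
      = ∑ c ∈ s.toFinset ∪ g.toFinset, min ((s.count c : Int)) ((g.count c : Int)) := by
    apply pv_sum_extend
    · exact Finset.subset_union_left
    · intro c hc
      simp only [List.mem_toFinset] at hc
      rw [List.count_eq_zero.mpr hc]
      exact min_eq_left (by positivity)
  have hBsum : (((((s.zip g).filter (fun p => p.1 == p.2)).map Prod.fst).length : Nat) : Int)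
      = ∑ c ∈ s.toFinset ∪ g.toFinset,
          (((((s.zip g).filter (fun p => p.1 == p.2)).map Prod.fst).count c : Nat) : Int) := by
    have hsub : (((s.zip g).filter (fun p => p.1 == p.2)).map Prod.fst).toFinset ⊆ s.toFinset ∪ g.toFinset := by
      intro c hc
      simp only [List.mem_toFinset] at hc
      rcases List.mem_map.mp hc with ⟨p, hp, rfl⟩
      exact Finset.mem_union_left _
        (List.mem_toFinset.mpr (List.of_mem_zip (List.mem_filter.mp hp).1).1)
    have h1 : ∑ c ∈ (((s.zip g).filter (fun p => p.1 == p.2)).map Prod.fst).toFinset,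
          (((((s.zip g).filter (fun p => p.1 == p.2)).map Prod.fst).count c : Nat) : Int)
        = ∑ c ∈ s.toFinset ∪ g.toFinset,
          (((((s.zip g).filter (fun p => p.1 == p.2)).map Prod.fst).count c : Nat) : Int) := by
      apply pv_sum_extend _ _ hsub
      intro c hc
      simp only [List.mem_toFinset] at hc
      rw [List.count_eq_zero.mpr hc]
      rfl
    rw [← h1, ← Nat.cast_sum]
    exact_mod_cast congrArg (Nat.cast : Nat → Int)
      (List.sum_toFinset_count_eq_length (((s.zip g).filter (fun p => p.1 == p.2)).map Prod.fst)).symm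
  -- the Mastermind identity, per character then summed
  have hpt : ∑ c ∈ s.toFinset ∪ g.toFinset, min ((s.count c : Int)) ((g.count c : Int))
      = ∑ c ∈ s.toFinset ∪ g.toFinset,
          (min (((((s.zip g).filter (fun p => !(p.1 == p.2))).map Prod.fst).count c : Int))
               (((((s.zip g).filter (fun p => !(p.1 == p.2))).map Prod.snd).count c : Int))
            + (((((s.zip g).filter (fun p => p.1 == p.2)).map Prod.fst).count c : Nat) : Int)) := by
    apply Finset.sum_congr rfl
    intro c _
    rw [hscount c, hgcount c]
    push_cast
    omega
  rw [hblack, hWext, hText, hBsum, hpt, Finset.sum_add_distrib]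
  ring

-- ===== VERDICT (by name: the statement is the Claim_ definition above) =====
theorem check_spec : Claim_equal_check := by
  intro secret_code guess _
  unfold Spec_check check check_alt
  have hz := pv_zip_take_min secret_code.toList guess.toList
  simp only [hz.symm]
  refine Prod.ext rfl ?_
  exact pv_main _ _ (by simp) _ rfl
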